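-- pv_equiv track=rewrite | github.com/PanAnastasiy/LeetCode | 3602 Hexadecimal and Hexatrigesimal Conversion.py | concatHex36
-- ===== SOURCE A (Python) =====
-- def concatHex36(n: int) -> str:
--     def toBase(n, base) -> str:
--         digits = "0123456789ABCDEFGHIJKLMNOPQRSTUVWXYZ"
--         result = ''
--         while n > 0:
--             result += digits[n % base]
--             n //= base
--         return result[::-1]
--     return toBase(n**2, 16) + toBase(n**3, 36)
-- ===== SOURCE B (Python) =====
-- def concatHex36(n: int) -> str:
--     digits = "0123456789ABCDEFGHIJKLMNOPQRSTUVWXYZ"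
--
--     def toBase(m, base):
--         if m <= 0:
--             return ''
--         # find the largest power of base not exceeding m
--         p = 1
--         while p * base <= m:
--             p *= base
--         # peel digits most-significant-first; no reversal needed
--         out = ''
--         while p >= 1:
--             out += digits[m // p]
--             m %= p
--             p //= base
--         return out
--
--     return toBase(n ** 2, 16) + toBase(n ** 3, 36)
-- ===== Notes on version B (the rewrite author's own statement) =====
-- stated objective: alternative
-- what changed: B extracts digits most-significant-first by first computing the largest power of the base not exceeding the value and then peeling the top digit with m//p, m%=p, p//=base, instead of A's least-significant-first remainder loop followed by a string reversal.
import Mathlib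
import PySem

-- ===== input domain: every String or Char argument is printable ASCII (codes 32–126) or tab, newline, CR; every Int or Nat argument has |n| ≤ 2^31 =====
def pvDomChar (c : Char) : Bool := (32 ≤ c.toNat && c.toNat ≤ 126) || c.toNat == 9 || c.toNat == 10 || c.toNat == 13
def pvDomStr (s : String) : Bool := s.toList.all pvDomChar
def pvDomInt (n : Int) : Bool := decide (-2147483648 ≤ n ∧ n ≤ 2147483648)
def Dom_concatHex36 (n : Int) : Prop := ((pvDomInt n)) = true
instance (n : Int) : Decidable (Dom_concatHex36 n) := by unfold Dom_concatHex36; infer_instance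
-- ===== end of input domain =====

-- B extracts digits most-significant-first by dividing by precomputed powers of the base,
-- replacing A's least-significant-first remainder loop plus string reversal (alternative, same cost).

-- ===== PORT A =====
-- digits = "0123456789ABCDEFGHIJKLMNOPQRSTUVWXYZ" (shared constant of both sources)
def pvDigits : List Char := "0123456789ABCDEFGHIJKLMNOPQRSTUVWXYZ".toList

-- A's while-loop: state is (n, result); the index n % base is always in range
-- (0 ≤ n % base < base ≤ 36 when 0 < n), so pyGetD's default '?' is never used.
def toBaseLoopA (base : Int) (hb : 2 ≤ base) (n : Int) (result : List Char) : List Char :=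
  if 0 < n then
    toBaseLoopA base hb (PySem.Int.floordiv n base)
      (result ++ [PySem.List.pyGetD pvDigits (PySem.Int.mod n base) '?'])
  else result
termination_by n.toNat
decreasing_by
  have hd : PySem.Int.floordiv n base = n / base := PySem.Int.floordiv_eq_ediv_of_pos (by omega)
  have h1 : n / base < n := by
    rw [Int.ediv_lt_iff_lt_mul (by omega)]; nlinarith
  omega

-- A's toBase: run the loop with result = '', then result[::-1]
def toBaseA (n base : Int) (hb : 2 ≤ base) : List Char :=
  (toBaseLoopA base hb n []).reverse

def concatHex36 (n : Int) : String :=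
  String.ofList (toBaseA (n ^ 2) 16 (by norm_num) ++ toBaseA (n ^ 3) 36 (by norm_num))

-- ===== PORT B =====
-- B's first loop: while p * base <= m: p *= base
def findP (base m : Int) (hb : 2 ≤ base) (p : Int) (hp : 1 ≤ p) : Int :=
  if p * base ≤ m then findP base m hb (p * base) (by nlinarith) else p
termination_by (m - p).toNat
decreasing_by
  have : p + 1 ≤ p * base := by nlinarith
  omega

-- B's second loop: while p >= 1: out += digits[m // p]; m %= p; p //= base
-- the index m // p stays in 0..base-1 by the loop invariant, so pyGetD's default is never used.
def emitLoop (base : Int) (hb : 2 ≤ base) (m p : Int) (out : List Char) : List Char :=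
  if 1 ≤ p then
    emitLoop base hb (PySem.Int.mod m p) (PySem.Int.floordiv p base)
      (out ++ [PySem.List.pyGetD pvDigits (PySem.Int.floordiv m p) '?'])
  else out
termination_by p.toNat
decreasing_by
  have hd : PySem.Int.floordiv p base = p / base := PySem.Int.floordiv_eq_ediv_of_pos (by omega)
  have h1 : p / base < p := by
    rw [Int.ediv_lt_iff_lt_mul (by omega)]; nlinarith
  omega

-- B's toBase: early return '' for m <= 0, else the two loops
def toBaseAlt (base : Int) (hb : 2 ≤ base) (m : Int) : List Char :=
  if 0 < m then emitLoop base hb m (findP base m hb 1 (by norm_num)) []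
  else []

def concatHex36_alt (n : Int) : String :=
  String.ofList (toBaseAlt 16 (by norm_num) (n ^ 2) ++ toBaseAlt 36 (by norm_num) (n ^ 3))

-- ===== PRECONDITION & SPEC =====
def Spec_concatHex36 (n : Int) (out : String) : Prop := out = concatHex36_alt n
instance (n : Int) (out : String) : Decidable (Spec_concatHex36 n out) := by unfold Spec_concatHex36; infer_instance

-- ===== CLAIM (what is proved, stated in full; the proofs are below) =====
def Claim_equal_concatHex36 : Prop := ∀ (n : Int), Dom_concatHex36 n → Spec_concatHex36 n (concatHex36 n)

-- ===== LEMMAS AND PROOFS =====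

-- a % (b*c) / b = a / b % c for positive b, c
theorem pv_emod_mul_ediv (a b c : Int) (hb : 0 < b) (hc : 0 < c) :
    a % (b * c) / b = a / b % c := by
  have hbc : 0 < b * c := by positivity
  have hdm := Int.mul_ediv_add_emod a (b * c)
  set q := a / (b * c) with hq
  set r := a % (b * c) with hr
  have hr0 : 0 ≤ r := Int.emod_nonneg a (by omega)
  have hrlt : r < b * c := Int.emod_lt_of_pos a hbc
  have ha : a = r + b * (c * q) := by ring_nf; omega
  have h1 : a / b = r / b + c * q := by
    rw [ha, Int.add_mul_ediv_left _ _ (by omega : b ≠ 0)]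
  have h2 : (r / b + c * q) % c = r / b % c := by
    simp [Int.add_mul_emod_self_left]
  have h3 : r / b % c = r / b := by
    apply Int.emod_eq_of_lt (Int.ediv_nonneg hr0 (by omega))
    rw [Int.ediv_lt_iff_lt_mul hb]; linarith [hrlt]
  rw [h1, h2, h3]


-- A's digit sequence, written as a direct recursion (proof-side helper only).
def digA (base : Int) (hb : 2 ≤ base) (n : Int) : List Char :=
  if 0 < n then
    digA base hb (PySem.Int.floordiv n base)
      ++ [PySem.List.pyGetD pvDigits (PySem.Int.mod n base) '?']
  else []
termination_by n.toNat
decreasing_by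
  have hd : PySem.Int.floordiv n base = n / base := PySem.Int.floordiv_eq_ediv_of_pos (by omega)
  have h1 : n / base < n := by
    rw [Int.ediv_lt_iff_lt_mul (by omega)]; nlinarith
  omega

-- the base-`base` representation of m padded to exactly k digits (proof-side helper only)
def reprPad (base : Int) : Nat → Int → List Char
  | 0, _ => []
  | (k+1), m => reprPad base k (m / base) ++ [PySem.List.pyGetD pvDigits (m % base) '?']

theorem toBaseLoopA_reverse (base : Int) (hb : 2 ≤ base) (n : Int) (result : List Char) :
    (toBaseLoopA base hb n result).reverse = digA base hb n ++ result.reverse := by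
  induction n, result using toBaseLoopA.induct base hb with
  | case1 n result h ih =>
    rw [toBaseLoopA, if_pos h, ih]
    conv_rhs => rw [digA]
    rw [if_pos h]; simp
  | case2 n result h =>
    rw [toBaseLoopA, if_neg h]
    conv_rhs => rw [digA]
    rw [if_neg h]; simp

theorem toBaseA_eq_digA (n base : Int) (hb : 2 ≤ base) :
    toBaseA n base hb = digA base hb n := by
  rw [toBaseA, toBaseLoopA_reverse]; simp

-- split the top digit off a padded representation
theorem reprPad_top (base : Int) (hb : 2 ≤ base) (k : Nat) (m : Int)
    (hm0 : 0 ≤ m) (hm : m < base ^ (k+1)) :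
    reprPad base (k+1) m
      = PySem.List.pyGetD pvDigits (m / base ^ k) '?' :: reprPad base k (m % base ^ k) := by
  induction k generalizing m with
  | zero =>
    show reprPad base 0 (m / base) ++ [PySem.List.pyGetD pvDigits (m % base) '?'] = _
    rw [Int.emod_eq_of_lt hm0 (by simpa using hm), pow_zero, Int.ediv_one, Int.emod_one]
    simp [reprPad]
  | succ k ih =>
    have hbpos : (0:Int) < base := by omega
    have hpk : (0:Int) < base ^ k := by positivity
    have hd0 : 0 ≤ m / base := Int.ediv_nonneg hm0 (by omega)
    have hdlt : m / base < base ^ (k+1) := by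
      rw [Int.ediv_lt_iff_lt_mul hbpos]
      calc m < base ^ (k+2) := hm
        _ = base ^ (k+1) * base := by ring
    have ha : m / base / base ^ k = m / base ^ (k+1) := by
      rw [Int.ediv_ediv_of_nonneg (by omega : (0:Int) ≤ base), ← pow_succ' base k]
    have hbeq : m % base ^ (k+1) / base = m / base % base ^ k := by
      have := pv_emod_mul_ediv m base (base ^ k) hbpos hpk
      rw [← pow_succ' base k] at this
      exact this
    have hc : m % base ^ (k+1) % base = m % base := by
      exact Int.emod_emod_of_dvd m (dvd_pow_self base (Nat.succ_ne_zero k))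
    show reprPad base (k+1) (m / base) ++ [PySem.List.pyGetD pvDigits (m % base) '?'] = _
    rw [ih (m / base) hd0 hdlt]
    show _ = PySem.List.pyGetD pvDigits (m / base ^ (k+1)) '?'
        :: (reprPad base k (m % base ^ (k+1) / base)
            ++ [PySem.List.pyGetD pvDigits (m % base ^ (k+1) % base) '?'])
    rw [ha, hbeq, hc]
    simp

-- the emit loop over p = base^k produces the (k+1)-digit padded representation
theorem emitLoop_eq (base : Int) (hb : 2 ≤ base) (k : Nat) (m : Int) (out : List Char)
    (hm0 : 0 ≤ m) (hm : m < base ^ (k+1)) :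
    emitLoop base hb m (base ^ k) out = out ++ reprPad base (k+1) m := by
  induction k generalizing m out with
  | zero =>
    rw [emitLoop]
    simp only [pow_zero] at *
    rw [if_pos (by norm_num : (1:Int) ≤ 1)]
    have h1 : PySem.Int.mod m 1 = 0 := by
      rw [PySem.Int.mod_eq_emod_of_pos (by norm_num)]; simp
    have h2 : PySem.Int.floordiv 1 base = 0 := by
      rw [PySem.Int.floordiv_eq_ediv_of_pos (by omega)]
      exact Int.ediv_eq_zero_of_lt (by norm_num) (by omega)
    have h3 : PySem.Int.floordiv m 1 = m := by
      rw [PySem.Int.floordiv_eq_ediv_of_pos (by norm_num)]; simp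
    rw [h1, h2, h3, emitLoop, if_neg (by norm_num)]
    show _ = out ++ (reprPad base 0 (m / base) ++ [PySem.List.pyGetD pvDigits (m % base) '?'])
    rw [Int.emod_eq_of_lt hm0 (by simpa using hm)]
    simp [reprPad]
  | succ k ih =>
    have hbpos : (0:Int) < base := by omega
    have hpk1 : (0:Int) < base ^ (k+1) := by positivity
    rw [emitLoop, if_pos (by omega : (1:Int) ≤ base ^ (k+1))]
    have h1 : PySem.Int.mod m (base ^ (k+1)) = m % base ^ (k+1) :=
      PySem.Int.mod_eq_emod_of_pos hpk1
    have h2 : PySem.Int.floordiv (base ^ (k+1)) base = base ^ k := by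
      rw [PySem.Int.floordiv_eq_ediv_of_pos hbpos, pow_succ]
      exact Int.mul_ediv_cancel _ (by omega)
    have h3 : PySem.Int.floordiv m (base ^ (k+1)) = m / base ^ (k+1) :=
      PySem.Int.floordiv_eq_ediv_of_pos hpk1
    rw [h1, h2, h3]
    rw [ih (m % base ^ (k+1)) _ (Int.emod_nonneg m (by omega)) (Int.emod_lt_of_pos m hpk1)]
    rw [reprPad_top base hb (k+1) m hm0 hm]
    simp

-- with a tight bound there is no leading zero: digA agrees with the padded representation
theorem digA_eq_reprPad (base : Int) (hb : 2 ≤ base) (k : Nat) (m : Int)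
    (h1 : base ^ k ≤ m) (h2 : m < base ^ (k+1)) :
    digA base hb m = reprPad base (k+1) m := by
  induction k generalizing m with
  | zero =>
    simp only [pow_zero] at h1 h2
    rw [digA, if_pos (by omega)]
    have hd : PySem.Int.floordiv m base = 0 := by
      rw [PySem.Int.floordiv_eq_ediv_of_pos (by omega)]
      exact Int.ediv_eq_zero_of_lt (by omega) (by simpa using h2)
    rw [hd, digA, if_neg (by norm_num)]
    show _ = reprPad base 0 (m / base) ++ [PySem.List.pyGetD pvDigits (m % base) '?']
    rw [PySem.Int.mod_eq_emod_of_pos (by omega : (0:Int) < base)]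
    simp [reprPad]
  | succ k ih =>
    have hbpos : (0:Int) < base := by omega
    have hpk : (0:Int) < base ^ k := by positivity
    have hm0 : 0 < m := by
      have : (0:Int) < base ^ (k+1) := by positivity
      omega
    rw [digA, if_pos hm0]
    have hfd : PySem.Int.floordiv m base = m / base :=
      PySem.Int.floordiv_eq_ediv_of_pos hbpos
    have hmd : PySem.Int.mod m base = m % base :=
      PySem.Int.mod_eq_emod_of_pos hbpos
    have hlo : base ^ k ≤ m / base := by
      rw [Int.le_ediv_iff_mul_le hbpos]
      calc base ^ k * base = base ^ (k+1) := by ring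
        _ ≤ m := h1
    have hhi : m / base < base ^ (k+1) := by
      rw [Int.ediv_lt_iff_lt_mul hbpos]
      calc m < base ^ (k+2) := h2
        _ = base ^ (k+1) * base := by ring
    rw [hfd, hmd, ih (m / base) hlo hhi]
    rfl

theorem findP_spec (base m : Int) (hb : 2 ≤ base) (p : Int) (hp : 1 ≤ p)
    (j : Nat) (hpj : p = base ^ j) (hpm : p ≤ m) :
    ∃ k : Nat, findP base m hb p hp = base ^ k ∧ base ^ k ≤ m ∧ m < base ^ (k+1) := by
  induction p, hp using findP.induct base m hb generalizing j with
  | case1 p hp h ih =>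
    rw [findP, if_pos h]
    exact ih (j+1) (by rw [hpj, pow_succ]) h
  | case2 p hp h =>
    rw [findP, if_neg h]
    exact ⟨j, hpj, by omega, by rw [pow_succ, ← hpj]; omega⟩

theorem toBase_eq (base : Int) (hb : 2 ≤ base) (m : Int) :
    toBaseA m base hb = toBaseAlt base hb m := by
  rw [toBaseA_eq_digA]
  rw [toBaseAlt]
  by_cases h : 0 < m
  · rw [if_pos h]
    obtain ⟨k, hfp, h1, h2⟩ := findP_spec base m hb 1 (by norm_num) 0 (by simp) (by omega)
    rw [hfp, emitLoop_eq base hb k m [] (by omega) h2, digA_eq_reprPad base hb k m h1 h2]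
    simp
  · rw [if_neg h, digA, if_neg h]

-- ===== VERDICT (by name: the statement is the Claim_ definition above) =====
theorem concatHex36_spec : Claim_equal_concatHex36 := by
  intro n _
  unfold Spec_concatHex36 concatHex36 concatHex36_alt
  rw [toBase_eq, toBase_eq]
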